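-- pv_equiv track=rewrite | github.com/MRI-Lab-Graz/bids-fastsurfer | scripts/generate_qdec.py | has_multiple_sessions
-- ===== SOURCE A (Python) =====
-- from typing import Dict, List, Optional, Tuple, Set
--
-- def has_multiple_sessions(timepoints: List[Tuple[str, str, Optional[str]]]) -> bool:
--     """Check if any subject has multiple sessions (timepoints)."""
--     subject_sessions = {}
--     for fsid, base, ses in timepoints:
--         if ses:  # Only count actual sessions
--             if base not in subject_sessions:
--                 subject_sessions[base] = []
--             subject_sessions[base].append(ses)
--
--     # Check if any subject has more than one session
--     return any(len(sessions) > 1 for sessions in subject_sessions.values())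
-- ===== SOURCE B (Python) =====
-- def has_multiple_sessions(timepoints):
--     """Check if any subject has multiple sessions (timepoints)."""
--     seen = set()
--     for _fsid, base, ses in timepoints:
--         if ses:
--             if base in seen:
--                 return True
--             seen.add(base)
--     return False
-- ===== Notes on version B (the rewrite author's own statement) =====
-- stated objective: simpler
-- what changed: Replaces the dict-of-session-lists accumulation followed by an any(len>1) scan with a single early-exit pass that keeps one set of bases already seen with a truthy session and returns True on the first repeat.
import Mathlib
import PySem

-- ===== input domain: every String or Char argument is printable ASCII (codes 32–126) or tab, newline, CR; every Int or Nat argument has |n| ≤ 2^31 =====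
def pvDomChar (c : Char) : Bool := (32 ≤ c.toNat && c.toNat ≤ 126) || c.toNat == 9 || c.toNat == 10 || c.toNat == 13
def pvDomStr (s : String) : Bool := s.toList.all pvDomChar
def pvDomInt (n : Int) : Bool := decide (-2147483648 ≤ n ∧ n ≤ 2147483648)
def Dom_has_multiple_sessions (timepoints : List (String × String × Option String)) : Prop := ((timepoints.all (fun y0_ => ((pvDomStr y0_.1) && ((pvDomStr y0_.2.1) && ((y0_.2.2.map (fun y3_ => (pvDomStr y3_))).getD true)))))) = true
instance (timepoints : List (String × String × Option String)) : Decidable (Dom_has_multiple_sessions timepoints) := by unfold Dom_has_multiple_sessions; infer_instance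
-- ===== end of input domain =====

-- B replaces A's dict-of-lists grouping + final any(len>1) scan with a single early-exit pass
-- over a set of already-seen bases (objective: simpler); return values proved equal on all inputs.


-- ===== PORT A =====
-- the loop body: 'if ses: (if base not in d: d[base] = []); d[base].append(ses)'
def hmsStepA (d : PySem.Dict String (List String)) (t : String × String × Option String) :
    PySem.Dict String (List String) :=
  match t.2.2 with
  | none => d                      -- 'if ses:' — None is falsy
  | some s =>
    if s = "" then d               -- 'if ses:' — the empty string is falsy
    else
      let d' := if d.contains t.2.1 then d else d.insert t.2.1 ([] : List String)
      d'.insert t.2.1 (d'.getD t.2.1 [] ++ [s])   -- append mutates the stored list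

def has_multiple_sessions (timepoints : List (String × String × Option String)) : Bool :=
  let subject_sessions := timepoints.foldl hmsStepA PySem.Dict.empty
  (subject_sessions.values).any (fun sessions => decide (1 < sessions.length))

-- ===== PORT B =====
-- early-exit pass: 'if base in seen: return True; seen.add(base)'
def hmsLoopB (seen : PySem.Set String) : List (String × String × Option String) → Bool
  | [] => false
  | t :: rest =>
    match t.2.2 with
    | none => hmsLoopB seen rest
    | some s =>
      if s = "" then hmsLoopB seen rest
      else if seen.contains t.2.1 then true
      else hmsLoopB (PySem.Set.add seen t.2.1) rest

def has_multiple_sessions_alt (timepoints : List (String × String × Option String)) : Bool :=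
  hmsLoopB PySem.Set.empty timepoints

-- ===== PRECONDITION & SPEC =====
def Spec_has_multiple_sessions (timepoints : List (String × String × Option String)) (out : Bool) : Prop := out = has_multiple_sessions_alt timepoints
instance (timepoints : List (String × String × Option String)) (out : Bool) : Decidable (Spec_has_multiple_sessions timepoints out) := by unfold Spec_has_multiple_sessions; infer_instance

-- ===== CLAIM (what is proved, stated in full; the proofs are below) =====
def Claim_equal_has_multiple_sessions : Prop := ∀ (timepoints : List (String × String × Option String)), Dom_has_multiple_sessions timepoints → Spec_has_multiple_sessions timepoints (has_multiple_sessions timepoints)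

-- ===== LEMMAS AND PROOFS =====

-- the (base, session) pairs of the timepoints with a truthy session
def hmsPairs (timepoints : List (String × String × Option String)) : List (String × String) :=
  timepoints.filterMap (fun t =>
    match t.2.2 with
    | none => none
    | some s => if s = "" then none else some (t.2.1, s))

theorem hmsPairs_none (f b : String) (rest : List (String × String × Option String)) :
    hmsPairs ((f, b, none) :: rest) = hmsPairs rest := by simp [hmsPairs]

theorem hmsPairs_empty (f b : String) (rest : List (String × String × Option String)) :
    hmsPairs ((f, b, some "") :: rest) = hmsPairs rest := by simp [hmsPairs]

theorem hmsPairs_some (f b s : String) (rest : List (String × String × Option String))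
    (hs : ¬ s = "") : hmsPairs ((f, b, some s) :: rest) = (b, s) :: hmsPairs rest := by
  simp [hmsPairs, hs]

-- A's loop body is exactly a dict 'modify' at the base, with default []
theorem hmsStepA_eq_modify (d : PySem.Dict String (List String)) (b s : String) (f : String)
    (hs : ¬ s = "") :
    hmsStepA d (f, b, some s) = d.modify b [] (· ++ [s]) := by
  simp only [hmsStepA, hs, if_false, PySem.Dict.modify]
  by_cases h : d.contains b
  · simp [h]
  · simp [h, PySem.Dict.insert_insert_self, PySem.Dict.getD_insert_self,
      PySem.Dict.getD_of_not_contains]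

-- A's fold over the timepoints is the grouping fold over the truthy (base, session) pairs
theorem hmsFold_eq (l : List (String × String × Option String))
    (d : PySem.Dict String (List String)) :
    l.foldl hmsStepA d = (hmsPairs l).foldl (fun d p => d.modify p.1 [] (· ++ [p.2])) d := by
  induction l generalizing d with
  | nil => rfl
  | cons t rest ih =>
    obtain ⟨f, b, ses⟩ := t
    match ses with
    | none => simpa [hmsPairs_none, hmsStepA] using ih d
    | some s =>
      by_cases hs : s = ""
      · subst hs; simpa [hmsPairs_empty, hmsStepA] using ih d
      · rw [List.foldl_cons, hmsPairs_some f b s rest hs, List.foldl_cons,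
          hmsStepA_eq_modify d b s f hs, ih]

-- count of a first component among pairs = count in the projected list
theorem hms_count_filter (ps : List (String × String)) (b : String) :
    ((ps.filter (fun p => p.1 == b)).length : Nat) = (ps.map (·.1)).count b := by
  induction ps with
  | nil => rfl
  | cons p ps ih =>
    by_cases h : b = p.1
    · subst h; simp [ih]
    · simp [Ne.symm h, ih]

-- 'some distinct element occurs more than once' = 'the list is not duplicate-free'
theorem hms_any_count (bs : List String) :
    ((PySem.Set.ofList bs).any (fun b => decide (1 < bs.count b))) = !decide bs.Nodup := by
  by_cases hnd : bs.Nodup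
  · simp only [hnd, decide_true, Bool.not_true, List.any_eq_false]
    intro x hx
    have := List.nodup_iff_count_le_one.mp hnd x
    simp only [decide_eq_true_eq]
    omega
  · simp only [hnd, decide_false, Bool.not_false, List.any_eq_true]
    rw [List.nodup_iff_count_le_one] at hnd
    simp only [not_forall, not_le] at hnd
    obtain ⟨b, hb⟩ := hnd
    have hbmem : b ∈ bs := List.count_pos_iff.mp (by omega)
    exact ⟨b, (PySem.Set.mem_ofList bs b).mpr hbmem, by simp; omega⟩

-- A returns true iff some truthy base repeats
theorem hmsA_char (l : List (String × String × Option String)) :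
    has_multiple_sessions l = !((hmsPairs l).map (·.1)).Nodup := by
  have hnd : (l.foldl hmsStepA PySem.Dict.empty).keys.Nodup := by
    rw [hmsFold_eq]
    exact PySem.Dict.nodup_keys_foldl_modify_key (hmsPairs l) (·.1) [] _ PySem.Dict.empty
      PySem.Dict.nodup_keys_empty
  have hvals := PySem.Dict.values_eq_map_keys (l.foldl hmsStepA PySem.Dict.empty) hnd
    ([] : List String)
  have hkeys : (l.foldl hmsStepA PySem.Dict.empty).keys
      = PySem.Set.ofList ((hmsPairs l).map (·.1)) := by
    rw [hmsFold_eq, PySem.Dict.keys_foldl_modify_key]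
    simp [PySem.Set.ofList_eq_foldl, PySem.Set.update]
  have hget : ∀ b, (l.foldl hmsStepA PySem.Dict.empty).getD b []
      = ((hmsPairs l).filter (fun p => p.1 == b)).map (·.2) := by
    intro b
    rw [hmsFold_eq]
    simpa using PySem.Dict.getD_foldl_modify_append (hmsPairs l) PySem.Dict.empty b
  simp only [has_multiple_sessions, hvals, hkeys, List.any_map, Function.comp_def, hget,
    List.length_map, hms_count_filter]
  rw [hms_any_count]

-- B's loop with a duplicate-free 'seen' detects exactly a repeat against seen ++ the truthy bases
theorem hmsB_char (l : List (String × String × Option String)) (seen : PySem.Set String)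
    (hseen : seen.Nodup) :
    hmsLoopB seen l = !(seen ++ (hmsPairs l).map (·.1)).Nodup := by
  induction l generalizing seen with
  | nil => simp [hmsLoopB, hmsPairs, hseen]
  | cons t rest ih =>
    obtain ⟨f, b, ses⟩ := t
    match ses with
    | none => simpa [hmsLoopB, hmsPairs_none] using ih seen hseen
    | some s =>
      by_cases hs : s = ""
      · subst hs; simpa [hmsLoopB, hmsPairs_empty] using ih seen hseen
      · rw [hmsPairs_some f b s rest hs]
        simp only [hmsLoopB, hs, if_false, List.map_cons]
        by_cases hmem : seen.contains b
        · have hb : b ∈ seen := by simpa using hmem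
          have hdup : ¬ (seen ++ b :: (hmsPairs rest).map (·.1)).Nodup := by
            intro hnodup
            exact (List.disjoint_of_nodup_append hnodup) hb List.mem_cons_self
          rw [if_pos hmem]
          simp [hdup]
        · have hb : b ∉ seen := by intro h; exact hmem (by simpa using h)
          have hadd : PySem.Set.add seen b = seen ++ [b] := by
            simp [PySem.Set.add, hb]
          have hdisj : seen.Disjoint [b] := by
            intro x hx hxb
            rw [List.mem_singleton] at hxb
            exact hb (hxb ▸ hx)
          have hnodup : (seen ++ [b]).Nodup :=
            List.Nodup.append hseen (List.nodup_singleton b) hdisj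
          rw [if_neg hmem, hadd, ih (seen ++ [b]) hnodup, List.append_assoc,
            List.singleton_append]
          simp

-- ===== VERDICT (by name: the statement is the Claim_ definition above) =====
theorem has_multiple_sessions_spec : Claim_equal_has_multiple_sessions := by
  intro l _
  unfold Spec_has_multiple_sessions has_multiple_sessions_alt
  rw [hmsA_char, hmsB_char l PySem.Set.empty (by simp [PySem.Set.empty])]
  simp [PySem.Set.empty]
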